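-- pv_equiv track=rewrite | github.com/jgwillard/playground | problems/dp/max_score_mult_operations.py | maximumScoreBottomUp
-- ===== SOURCE A (Python) =====
-- from typing import Dict, List
--
-- def maximumScoreBottomUp(nums: List[int], multipliers: List[int]) -> int:
--     n = len(nums)
--     m = len(multipliers)
--
--     dp: Dict[int, Dict[int, int]] = {i: {} for i in range(0, m + 1)}
--
--     # base case: explicitly set row m to have all 0 values, because
--     # on the first iteration of the loop where i == m - 1, we check
--     # each value of dp[i - 1] == dp[m], in which case there are no
--     # more operations so nothing to add to the score
--     dp[m] = {i: 0 for i in range(0, m + 1)}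
--
--     for i in reversed(range(0, m)):
--         # in an iteration i, the left index has a maximum of i
--         # possible values if we always choose the leftmost number
--         # (the left index can increase by at most 1 per iteration)
--         # this loop iterates over all possible left-index values for
--         # the current value of i
--         for left in reversed(range(0, i + 1)):
--
--             right = n - 1 - (i - left)
--
--             dp[i][left] = max(
--                 multipliers[i] * nums[left] + dp[i + 1][left + 1],
--                 multipliers[i] * nums[right] + dp[i + 1][left],
--             )
--
--     return dp[0][0]
-- ===== SOURCE B (Python) =====
-- from typing import List
--
--
-- def maximumScoreBottomUp(nums: List[int], multipliers: List[int]) -> int: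
--     # Top-down memoized recursion over (operation index i, left pointer),
--     # instead of A's bottom-up table fill: only reachable states are computed.
--     n = len(nums)
--     m = len(multipliers)
--     memo = {}
--
--     def rec(i: int, left: int) -> int:
--         if i == m:
--             return 0
--         key = (i, left)
--         if key not in memo:
--             right = n - 1 - (i - left)
--             memo[key] = max(
--                 multipliers[i] * nums[left] + rec(i + 1, left + 1),
--                 multipliers[i] * nums[right] + rec(i + 1, left),
--             )
--         return memo[key]
--
--     return rec(0, 0)
-- ===== Notes on version B (the rewrite author's own statement) =====
-- stated objective: alternative
-- what changed: Replaces A's backward bottom-up dict-of-dicts table fill with top-down memoized recursion rec(i,left) on the same recurrence, recursing forward over operations; being recursive, B is subject to Python's recursion limit on very large m where iterative A is not.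
import Mathlib
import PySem

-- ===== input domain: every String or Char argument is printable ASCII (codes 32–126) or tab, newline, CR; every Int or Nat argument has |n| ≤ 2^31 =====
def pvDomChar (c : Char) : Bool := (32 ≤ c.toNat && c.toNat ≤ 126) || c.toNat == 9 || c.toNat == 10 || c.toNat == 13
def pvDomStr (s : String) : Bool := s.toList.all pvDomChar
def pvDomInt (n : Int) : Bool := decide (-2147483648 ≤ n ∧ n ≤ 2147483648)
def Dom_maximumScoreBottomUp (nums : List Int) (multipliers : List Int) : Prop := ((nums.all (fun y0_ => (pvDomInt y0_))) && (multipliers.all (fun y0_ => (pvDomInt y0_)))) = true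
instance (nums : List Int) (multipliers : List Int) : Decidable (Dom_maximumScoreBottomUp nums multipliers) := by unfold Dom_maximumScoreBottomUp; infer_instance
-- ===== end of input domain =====

-- B replaces A's backward bottom-up table fill with top-down memoized recursion on the same
-- recurrence (a different decomposition; as plain Python recursion, B hits the interpreter's
-- recursion limit on very large m where iterative A does not — values agree where both return).

-- ===== PORT A =====
-- Dict reads dp[i+1][left+1] / dp[i+1][left] / dp[0][0]: every key read is present on EVERY
-- input (rows 0..m are inserted up front, row j holds keys 0..j after processing), so Dict.getD
-- is exact for Python's dp[.][.]; list reads nums[..]/multipliers[..] use pyGetD, whose default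
-- is only reachable when Python raises IndexError, i.e. outside Pre_maximumScoreBottomUp.
def maximumScoreBottomUp (nums : List Int) (multipliers : List Int) : Int :=
  let n : Int := nums.length
  let m : Int := multipliers.length
  -- dp = {i: {} for i in range(0, m + 1)}
  let dp : PySem.Dict Int (PySem.Dict Int Int) :=
    (PySem.List.pyRange 0 (m + 1) 1).foldl (fun d i => d.insert i PySem.Dict.empty) PySem.Dict.empty
  -- dp[m] = {i: 0 for i in range(0, m + 1)}
  let rowm : PySem.Dict Int Int :=
    (PySem.List.pyRange 0 (m + 1) 1).foldl (fun d i => d.insert i 0) PySem.Dict.empty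
  let dp := dp.insert m rowm
  -- for i in reversed(range(0, m)): for left in reversed(range(0, i + 1)): dp[i][left] = max(..)
  let dp := ((PySem.List.pyRange 0 m 1).reverse).foldl (fun dp i =>
    ((PySem.List.pyRange 0 (i + 1) 1).reverse).foldl (fun dp left =>
      let right := n - 1 - (i - left)
      let v := max
        (PySem.List.pyGetD multipliers i 0 * PySem.List.pyGetD nums left 0 +
          (dp.getD (i + 1) PySem.Dict.empty).getD (left + 1) 0)
        (PySem.List.pyGetD multipliers i 0 * PySem.List.pyGetD nums right 0 +
          (dp.getD (i + 1) PySem.Dict.empty).getD left 0)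
      dp.modify i PySem.Dict.empty (fun row => row.insert left v)) dp) dp
  (dp.getD 0 PySem.Dict.empty).getD 0 0

-- ===== PORT B =====
-- Source B's helper rec(i, left): Python's memo dict is value-transparent caching (it never changes
-- the value returned, only avoids recomputation), so the port is the bare recursion; Python's
-- base case `if i == m: return 0` is totalized as `i ≥ m → 0` (B only ever calls rec with
-- i ≤ m, where the two coincide). right = n - 1 - (i - left); index reads use pyGetD whose
-- default is only reachable outside Pre_maximumScoreBottomUp.
def pvRec (nums multipliers : List Int) (i left : Nat) : Int :=
  if _h : i < multipliers.length then
    max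
      (PySem.List.pyGetD multipliers (i : Int) 0 * PySem.List.pyGetD nums (left : Int) 0 +
        pvRec nums multipliers (i + 1) (left + 1))
      (PySem.List.pyGetD multipliers (i : Int) 0 *
          PySem.List.pyGetD nums ((nums.length : Int) - 1 - ((i : Int) - (left : Int))) 0 +
        pvRec nums multipliers (i + 1) left)
  else 0
termination_by multipliers.length - i
decreasing_by all_goals omega

-- return rec(0, 0)
def maximumScoreBottomUp_alt (nums : List Int) (multipliers : List Int) : Int :=
  pvRec nums multipliers 0 0

-- ===== PRECONDITION & SPEC =====
-- Pre_ excludes exactly the inputs with len(multipliers) > len(nums), on which the Python A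
-- raises IndexError (nums[left] with left = m-1 ≥ n); B's Python raises there too.
def Pre_maximumScoreBottomUp (nums : List Int) (multipliers : List Int) : Prop :=
  multipliers.length ≤ nums.length
instance (nums : List Int) (multipliers : List Int) : Decidable (Pre_maximumScoreBottomUp nums multipliers) := by unfold Pre_maximumScoreBottomUp; infer_instance
def pvWitness_maximumScoreBottomUp : List Int × List Int := ([1, 2, 3], [2, 1])
def Spec_maximumScoreBottomUp (nums : List Int) (multipliers : List Int) (out : Int) : Prop := out = maximumScoreBottomUp_alt nums multipliers
instance (nums : List Int) (multipliers : List Int) (out : Int) : Decidable (Spec_maximumScoreBottomUp nums multipliers out) := by unfold Spec_maximumScoreBottomUp; infer_instance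

-- ===== CLAIM (what is proved, stated in full; the proofs are below) =====
def Claim_equal_maximumScoreBottomUp : Prop := ∀ (nums : List Int) (multipliers : List Int), Dom_maximumScoreBottomUp nums multipliers → Pre_maximumScoreBottomUp nums multipliers → Spec_maximumScoreBottomUp nums multipliers (maximumScoreBottomUp nums multipliers)

-- ===== LEMMAS AND PROOFS =====

-- zero-row: every getD-with-0 read of {i: 0 for i in range(..)} is 0
theorem pvZeroFold (L : List Int) (d : PySem.Dict Int Int)
    (hd : ∀ l : Int, d.getD l 0 = 0) :
    ∀ l : Int, (L.foldl (fun d i => d.insert i (0 : Int)) d).getD l 0 = 0 := by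
  induction L generalizing d with
  | nil => exact hd
  | cons x xs ih =>
    intro l
    rw [List.foldl_cons]
    refine ih _ (fun l' => ?_) l
    rw [PySem.Dict.getD_insert]
    split <;> [rfl; exact hd l']

def pvStep (nums multipliers : List Int) (i : Int)
    (dp : PySem.Dict Int (PySem.Dict Int Int)) (left : Int) :
    PySem.Dict Int (PySem.Dict Int Int) :=
  let v := max
    (PySem.List.pyGetD multipliers i 0 * PySem.List.pyGetD nums left 0 +
      (dp.getD (i + 1) PySem.Dict.empty).getD (left + 1) 0)
    (PySem.List.pyGetD multipliers i 0 *
        PySem.List.pyGetD nums ((nums.length : Int) - 1 - (i - left)) 0 +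
      (dp.getD (i + 1) PySem.Dict.empty).getD left 0)
  dp.modify i PySem.Dict.empty (fun row => row.insert left v)

theorem pvInner (nums multipliers : List Int) (i : Nat) (hi : i < multipliers.length) :
    ∀ (k : Nat), k ≤ i + 1 → ∀ (dp : PySem.Dict Int (PySem.Dict Int Int)),
    (∀ l : Nat, l ≤ i + 1 →
      ((dp.getD ((i : Int) + 1) PySem.Dict.empty).getD (l : Int) 0
        = pvRec nums multipliers (i + 1) l)) →
    (∀ j : Int, j ≠ (i : Int) →
      (((PySem.List.pyRange 0 (k : Int) 1).reverse).foldl (pvStep nums multipliers (i : Int)) dp).getD j PySem.Dict.empty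
        = dp.getD j PySem.Dict.empty) ∧
    (∀ l : Nat, l < k →
      ((((PySem.List.pyRange 0 (k : Int) 1).reverse).foldl (pvStep nums multipliers (i : Int)) dp).getD (i : Int) PySem.Dict.empty).getD (l : Int) 0
        = pvRec nums multipliers i l) ∧
    (∀ l : Int, (k : Int) ≤ l →
      ((((PySem.List.pyRange 0 (k : Int) 1).reverse).foldl (pvStep nums multipliers (i : Int)) dp).getD (i : Int) PySem.Dict.empty).getD l 0
        = (dp.getD (i : Int) PySem.Dict.empty).getD l 0) := by
  intro k
  induction k with
  | zero =>
    intro _ dp _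
    refine ⟨fun j _ => by simp [PySem.List.pyRange], fun l hl => absurd hl (by omega), fun l _ => by simp [PySem.List.pyRange]⟩
  | succ k ih =>
    intro hk dp hnext
    have h2 : PySem.List.pyRange 0 ((k + 1 : Nat) : Int) 1
        = PySem.List.pyRange 0 (k : Int) 1 ++ [(k : Int)] := by
      push_cast
      exact PySem.List.pyRange_one_succ_right (by positivity)
    rw [h2, List.reverse_append, List.reverse_singleton, List.singleton_append, List.foldl_cons]
    -- the value inserted at left = k is pvRec i k
    have hv : pvStep nums multipliers (i : Int) dp (k : Int)
        = dp.modify (i : Int) PySem.Dict.empty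
            (fun row => row.insert (k : Int) (pvRec nums multipliers i k)) := by
      rw [pvStep]
      have e1 : (k : Int) + 1 = ((k + 1 : Nat) : Int) := by push_cast; ring
      rw [e1, hnext (k + 1) (by omega), hnext k (by omega)]
      conv_rhs => rw [pvRec]
      rw [dif_pos hi]
    rw [hv]
    set dp1 := dp.modify (i : Int) PySem.Dict.empty
        (fun row => row.insert (k : Int) (pvRec nums multipliers i k)) with hdp1
    have hnext1 : ∀ l : Nat, l ≤ i + 1 →
        ((dp1.getD ((i : Int) + 1) PySem.Dict.empty).getD (l : Int) 0
          = pvRec nums multipliers (i + 1) l) := by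
      intro l hl
      rw [hdp1, PySem.Dict.getD_modify_of_ne _ _ _ (by omega)]
      exact hnext l hl
    obtain ⟨ha, hb1, hb2⟩ := ih (by omega) dp1 hnext1
    have hrow1 : dp1.getD (i : Int) PySem.Dict.empty
        = (dp.getD (i : Int) PySem.Dict.empty).insert (k : Int) (pvRec nums multipliers i k) := by
      rw [hdp1, PySem.Dict.getD_modify_self]
    refine ⟨?_, ?_, ?_⟩
    · intro j hj
      rw [ha j hj, hdp1, PySem.Dict.getD_modify_of_ne _ _ _ hj]
    · intro l hl
      by_cases hlk : l < k
      · exact hb1 l hlk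
      · have hlk' : l = k := by omega
        subst hlk'
        rw [hb2 (l : Int) le_rfl, hrow1, PySem.Dict.getD_insert_self]
    · intro l hl
      rw [hb2 l (by omega), hrow1, PySem.Dict.getD_insert_of_ne _ _ _ (by omega)]

theorem pvA_outer (nums multipliers : List Int)
    (G : PySem.Dict Int (PySem.Dict Int Int) → Int → PySem.Dict Int (PySem.Dict Int Int))
    (hG : ∀ (i : Nat) (dp : PySem.Dict Int (PySem.Dict Int Int)), i < multipliers.length →
      (∀ l : Nat, l ≤ i + 1 →
        ((dp.getD ((i : Int) + 1) PySem.Dict.empty).getD (l : Int) 0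
          = pvRec nums multipliers (i + 1) l)) →
      (∀ j : Int, j ≠ (i : Int) →
        (G dp (i : Int)).getD j PySem.Dict.empty = dp.getD j PySem.Dict.empty) ∧
      (∀ l : Nat, l ≤ i →
        (((G dp (i : Int)).getD (i : Int) PySem.Dict.empty).getD (l : Int) 0
          = pvRec nums multipliers i l))) :
    ∀ k, k ≤ multipliers.length → ∀ dp : PySem.Dict Int (PySem.Dict Int Int),
      (∀ j : Nat, k ≤ j → j ≤ multipliers.length → ∀ l : Nat, l ≤ j →
        ((dp.getD (j : Int) PySem.Dict.empty).getD (l : Int) 0 = pvRec nums multipliers j l)) →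
      ∀ j l : Nat, j ≤ multipliers.length → l ≤ j →
        ((((PySem.List.pyRange 0 (k : Int) 1).reverse).foldl G dp).getD (j : Int) PySem.Dict.empty).getD (l : Int) 0
          = pvRec nums multipliers j l := by
  intro k
  induction k with
  | zero =>
    intro _ dp h j l hj hl
    simpa [PySem.List.pyRange] using h j (by omega) hj l hl
  | succ k ih =>
    intro hk dp h j l hj hl
    have h2 : PySem.List.pyRange 0 ((k + 1 : Nat) : Int) 1
        = PySem.List.pyRange 0 (k : Int) 1 ++ [(k : Int)] := by
      push_cast
      exact PySem.List.pyRange_one_succ_right (by positivity)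
    rw [h2, List.reverse_append, List.reverse_singleton, List.singleton_append, List.foldl_cons]
    obtain ⟨ha, hb⟩ := hG k dp (by omega) (fun l' hl' => h (k + 1) (by omega) (by omega) l' hl')
    refine ih (by omega) (G dp (k : Int)) ?_ j l hj hl
    intro j' hj1 hj2 l' hl'
    by_cases hjk : j' = k
    · subst hjk
      exact hb l' hl'
    · rw [ha (j' : Int) (by exact_mod_cast hjk)]
      exact h j' (by omega) hj2 l' hl'

theorem maximumScoreBottomUp_A_eq_rec (nums multipliers : List Int) :
    maximumScoreBottomUp nums multipliers = pvRec nums multipliers 0 0 := by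
  show (((((PySem.List.pyRange 0 ((multipliers.length : Int)) 1).reverse).foldl
        (fun dp i =>
          ((PySem.List.pyRange 0 (i + 1) 1).reverse).foldl
            (pvStep nums multipliers i) dp)
        (((PySem.List.pyRange 0 ((multipliers.length : Int) + 1) 1).foldl
            (fun d i => d.insert i PySem.Dict.empty) PySem.Dict.empty).insert
          (multipliers.length : Int)
          ((PySem.List.pyRange 0 ((multipliers.length : Int) + 1) 1).foldl
            (fun d i => d.insert i (0 : Int)) PySem.Dict.empty))).getD 0
        PySem.Dict.empty).getD 0 0)
    = pvRec nums multipliers 0 0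
  have hG : ∀ (i : Nat) (dp : PySem.Dict Int (PySem.Dict Int Int)), i < multipliers.length →
      (∀ l : Nat, l ≤ i + 1 →
        ((dp.getD ((i : Int) + 1) PySem.Dict.empty).getD (l : Int) 0
          = pvRec nums multipliers (i + 1) l)) →
      (∀ j : Int, j ≠ (i : Int) →
        (((PySem.List.pyRange 0 ((i : Int) + 1) 1).reverse).foldl (pvStep nums multipliers (i : Int)) dp).getD j PySem.Dict.empty
          = dp.getD j PySem.Dict.empty) ∧
      (∀ l : Nat, l ≤ i →
        ((((PySem.List.pyRange 0 ((i : Int) + 1) 1).reverse).foldl (pvStep nums multipliers (i : Int)) dp).getD (i : Int) PySem.Dict.empty).getD (l : Int) 0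
          = pvRec nums multipliers i l) := by
    intro i dp hi hnext
    have e1 : ((i : Int) + 1) = ((i + 1 : Nat) : Int) := by push_cast; ring
    obtain ⟨ha, hb1, hb2⟩ := pvInner nums multipliers i hi (i + 1) le_rfl dp hnext
    rw [e1]
    exact ⟨ha, fun l hl => hb1 l (by omega)⟩
  have hinit : ∀ j : Nat, multipliers.length ≤ j → j ≤ multipliers.length → ∀ l : Nat, l ≤ j →
      (((((PySem.List.pyRange 0 ((multipliers.length : Int) + 1) 1).foldl
            (fun d i => d.insert i PySem.Dict.empty) PySem.Dict.empty).insert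
            (multipliers.length : Int)
            ((PySem.List.pyRange 0 ((multipliers.length : Int) + 1) 1).foldl
              (fun d i => d.insert i (0 : Int)) PySem.Dict.empty)).getD (j : Int)
            PySem.Dict.empty).getD (l : Int) 0
        = pvRec nums multipliers j l) := by
    intro j hj1 hj2 l _
    have hj : j = multipliers.length := by omega
    subst hj
    rw [PySem.Dict.getD_insert_self]
    rw [pvZeroFold _ _ (fun l' => PySem.Dict.getD_empty _ _)]
    rw [pvRec]
    simp
  have hfin := pvA_outer nums multipliers
    (fun dp ii => ((PySem.List.pyRange 0 (ii + 1) 1).reverse).foldl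
      (pvStep nums multipliers ii) dp) hG multipliers.length le_rfl _ hinit 0 0
    (by omega) le_rfl
  simpa using hfin

-- ===== VERDICT (by name: the statement is the Claim_ definition above) =====
theorem maximumScoreBottomUp_spec : Claim_equal_maximumScoreBottomUp := by
  intro nums multipliers _ _
  unfold Spec_maximumScoreBottomUp maximumScoreBottomUp_alt
  rw [maximumScoreBottomUp_A_eq_rec]
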